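-- pv_equiv track=rewrite | github.com/Raikhen/cosc59 | A00/example.py | get_prime_partitions
-- ===== SOURCE A (Python) =====
-- def get_primes(lower_bound, upper_bound):
--   nums = [-1 for k in range(upper_bound + 1)]
--
--   k = 2
--   while k * k < upper_bound:
--     if nums[k] == -1:
--       nums[k] = 1
--
--       for i in range(2, upper_bound // k + 1):
--         if i * k <= upper_bound:
--           nums[i * k] = 0
--     k += 1
--
--   def check(m):
--     return nums[m] != 0 and m >= lower_bound
--
--   return list(filter(check, range(2, upper_bound + 1)))
--
-- def get_prime_partitions(n, bound = 2):
--   partitions = []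
--   primes = get_primes(bound, n)
--
--   if n < 2:
--     return []
--
--   for p in primes:
--     if n == p:
--       partitions += [[p]]
--
--     smaller_partitions = get_prime_partitions(n - p, p + 1)
--
--     if len(smaller_partitions) > 0:
--       for partition in smaller_partitions:
--         partition.append(p)
--
--       partitions += smaller_partitions
--
--   return partitions
-- ===== SOURCE B (Python) =====
-- def get_primes(lower_bound, upper_bound):
--   nums = [-1 for k in range(upper_bound + 1)]
--
--   k = 2
--   while k * k < upper_bound:
--     if nums[k] == -1:
--       nums[k] = 1
--
--       for i in range(2, upper_bound // k + 1):
--         if i * k <= upper_bound: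
--           nums[i * k] = 0
--     k += 1
--
--   def check(m):
--     return nums[m] != 0 and m >= lower_bound
--
--   return list(filter(check, range(2, upper_bound + 1)))
--
-- def get_prime_partitions(n, bound = 2):
--   if n < 2:
--     return []
--   results = []
--
--   def descend(remaining, bound, path):
--     for p in get_primes(bound, remaining):
--       if remaining == p:
--         results.append((path + [p])[::-1])
--       descend(remaining - p, p + 1, path + [p])
--
--   descend(n, bound, [])
--   return results
-- ===== Notes on version B (the rewrite author's own statement) =====
-- stated objective: alternative
-- what changed: get_primes is kept verbatim, but the partition search is rewritten as accumulator-passing backtracking: a descend(remaining, bound, path) helper walks an ascending path and appends each completed partition (reversed) to one shared results list, instead of A's per-level recursion that builds each sub-result list, mutates every inner list with append and concatenates level by level.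
import Mathlib
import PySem

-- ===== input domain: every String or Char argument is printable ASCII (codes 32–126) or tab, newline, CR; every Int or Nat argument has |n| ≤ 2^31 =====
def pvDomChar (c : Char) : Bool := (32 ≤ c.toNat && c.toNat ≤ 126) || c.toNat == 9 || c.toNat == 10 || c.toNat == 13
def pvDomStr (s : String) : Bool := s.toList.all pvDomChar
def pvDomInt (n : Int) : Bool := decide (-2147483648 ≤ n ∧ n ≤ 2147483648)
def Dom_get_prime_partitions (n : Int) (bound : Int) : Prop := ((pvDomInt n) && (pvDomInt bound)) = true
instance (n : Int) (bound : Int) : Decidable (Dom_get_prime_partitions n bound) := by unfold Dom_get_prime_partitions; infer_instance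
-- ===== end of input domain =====

-- B re-implements the partition search as accumulator-passing backtracking over an ascending
-- path (results collected top-down) instead of A's per-level build-then-append-and-concatenate;
-- get_primes is kept verbatim and shared. Objective: alternative decomposition, not speed.
-- Both recursions are written with a Nat fuel as totality device only (depth ≤ n/2 + 1, so
-- fuel n.toNat + 1 is never exhausted; the proved equality holds for every fuel).

-- ===== PORT A =====
-- shared helper: port of get_primes (identical in Source A and Source B)

-- inner `for i in range(2, upper // k + 1): if i * k <= upper: nums[i*k] = 0`
def sieveInner (upper k : Int) (nums : List Int) : List Int :=
  (PySem.List.pyRange 2 (PySem.Int.floordiv upper k + 1) 1).foldl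
    (fun ns i => if i * k ≤ upper then ns.set (i * k).toNat 0 else ns) nums

-- `while k * k < upper: …`, k = 2, 3, …; the loop runs while k < upper, so upper.toNat
-- fuel is never exhausted (at fuel 0 the guard k * k < upper is false anyway).
-- (reads nums[k]; in every reachable state 2 ≤ k < upper ≤ len nums - 1, in range)
def sieveLoop (upper : Int) : Nat → Int → List Int → List Int
  | 0, _, nums => nums
  | fuel + 1, k, nums =>
    if k * k < upper then
      let nums' := if (PySem.List.pyGet? nums k).getD 0 = -1
                   then sieveInner upper k (nums.set k.toNat 1)
                   else nums
      sieveLoop upper fuel (k + 1) nums'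
    else nums

def getPrimes (lower upper : Int) : List Int :=
  let nums := (List.range (upper + 1).toNat).map (fun _ => (-1 : Int))
  let nums := sieveLoop upper upper.toNat 2 nums
  (PySem.List.pyRange 2 (upper + 1) 1).filter
    (fun m => decide ((PySem.List.pyGet? nums m).getD 0 ≠ 0) && decide (lower ≤ m))

-- A's `for p in primes:` body; `rec` is the recursive call at the next fuel level
def goA (rec : Int → Int → List (List Int)) (n : Int) :
    List Int → List (List Int) → List (List Int)
  | [], partitions => partitions
  | p :: rest, partitions =>
    let partitions := if n = p then partitions ++ [[p]] else partitions
    let smaller := rec (n - p) (p + 1)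
    let partitions := if 0 < smaller.length
                      then partitions ++ smaller.map (fun q => q ++ [p]) else partitions
    goA rec n rest partitions

def pamA : Nat → Int → Int → List (List Int)
  | 0, _, _ => []
  | fuel + 1, n, bound =>
    let primes := getPrimes bound n
    if n < 2 then [] else goA (pamA fuel) n primes []

def get_prime_partitions (n : Int) (bound : Int) : List (List Int) :=
  pamA (n.toNat + 1) n bound

-- ===== PORT B =====
-- backtracking: path is the ascending prefix chosen so far, results the shared output list

-- B's `for p in get_primes(bound, remaining):` body; `rec` = descend at the next fuel level
def goB (rec : Int → Int → List Int → List (List Int) → List (List Int))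
    (remaining : Int) (path : List Int) :
    List Int → List (List Int) → List (List Int)
  | [], results => results
  | p :: rest, results =>
    let results := if remaining = p then results ++ [(path ++ [p]).reverse] else results
    let results := rec (remaining - p) (p + 1) (path ++ [p]) results
    goB rec remaining path rest results

def descendB : Nat → Int → Int → List Int → List (List Int) → List (List Int)
  | 0, _, _, _, results => results
  | fuel + 1, remaining, bound, path, results =>
    goB (descendB fuel) remaining path (getPrimes bound remaining) results

def get_prime_partitions_alt (n : Int) (bound : Int) : List (List Int) :=
  if n < 2 then [] else descendB (n.toNat + 1) n bound [] []

-- ===== PRECONDITION & SPEC =====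
def Spec_get_prime_partitions (n : Int) (bound : Int) (out : List (List Int)) : Prop := out = get_prime_partitions_alt n bound
instance (n : Int) (bound : Int) (out : List (List Int)) : Decidable (Spec_get_prime_partitions n bound out) := by unfold Spec_get_prime_partitions; infer_instance

-- ===== CLAIM (what is proved, stated in full; the proofs are below) =====
def Claim_equal_get_prime_partitions : Prop := ∀ (n : Int) (bound : Int), Dom_get_prime_partitions n bound → Spec_get_prime_partitions n bound (get_prime_partitions n bound)

-- ===== LEMMAS AND PROOFS =====

lemma getPrimes_nil {lo hi : Int} (h : hi < 2) : getPrimes lo hi = [] := by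
  unfold getPrimes
  rw [PySem.List.pyRange_one_eq_nil (by omega)]
  rfl

-- what one pass of A's loop body appends for a single prime p
def deltaA (rec : Int → Int → List (List Int)) (n p : Int) : List (List Int) :=
  (if n = p then [[p]] else []) ++ (rec (n - p) (p + 1)).map (fun q => q ++ [p])

lemma goA_cons (rec : Int → Int → List (List Int)) (n p : Int) (rest : List Int)
    (acc : List (List Int)) :
    goA rec n (p :: rest) acc = goA rec n rest (acc ++ deltaA rec n p) := by
  rw [goA, deltaA]
  split_ifs <;>
    simp_all [List.append_assoc, List.length_eq_zero_iff]

lemma goA_acc (rec : Int → Int → List (List Int)) (n : Int) (ps : List Int)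
    (acc : List (List Int)) :
    goA rec n ps acc = acc ++ goA rec n ps [] := by
  induction ps generalizing acc with
  | nil => simp [goA]
  | cons p rest ih =>
    rw [goA_cons, goA_cons, ih, ih (([] : List (List Int)) ++ deltaA rec n p)]
    simp [List.append_assoc]

lemma descendB_eq (fuel : Nat) : ∀ (r b : Int) (path : List Int) (results : List (List Int)),
    descendB fuel r b path results
      = results ++ (pamA fuel r b).map (fun q => q ++ path.reverse) := by
  induction fuel with
  | zero => intro r b path results; simp [descendB, pamA]
  | succ fuel ih =>
    intro r b path results
    by_cases h2 : r < 2
    · rw [descendB, getPrimes_nil h2, goB, pamA]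
      simp [h2]
    · have inner : ∀ (ps : List Int) (path : List Int) (results : List (List Int)),
          goB (descendB fuel) r path ps results
            = results ++ (goA (pamA fuel) r ps []).map (fun q => q ++ path.reverse) := by
        intro ps
        induction ps with
        | nil => intro path results; simp [goB, goA]
        | cons p rest ihp =>
          intro path results
          rw [goB]
          rw [ih (r - p) (p + 1) (path ++ [p]), ihp]
          rw [goA_cons, goA_acc (pamA fuel) r rest ([] ++ deltaA (pamA fuel) r p)]
          split_ifs with hrp <;>
            simp [deltaA, hrp, List.map_map, Function.comp_def, List.append_assoc]
      rw [descendB, inner (getPrimes b r) path results, pamA]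
      simp [h2]

-- ===== VERDICT (by name: the statement is the Claim_ definition above) =====
theorem get_prime_partitions_spec : Claim_equal_get_prime_partitions := by
  intro n bound _
  unfold Spec_get_prime_partitions get_prime_partitions get_prime_partitions_alt
  by_cases h : n < 2
  · rw [pamA]; simp [h]
  · rw [if_neg h, descendB_eq (n.toNat + 1) n bound [] []]
    simp
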